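-- pv_equiv track=rewrite | github.com/peesusanthosh/DirectMachineTranslator-IBMModel1 | problem1_strategies.py | removeBeBeforeVerbs
-- ===== SOURCE A (Python) =====
-- def verb(pos):
--     if pos[1] == 'VB' or pos[1] == 'VBD' or pos[1] == 'VBG' or pos[1] == 'VBN' or pos[1] == 'VBP' or pos[1] == 'VBZ':
--         return True
--     return False
--
-- def removeBeBeforeVerbs(line):
--     removeBe = []
--     for index in range(0, len(line)):
--         current = line[index]
--         #print 'curr = ', curr
--         if current[0] == 'be' and index != len(line)-1:
--             next = line[index+1]
--             if verb(next) is False: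
--                 removeBe.append(current)
--         else:
--             removeBe.append(current)
--
--     return removeBe
-- ===== SOURCE B (Python) =====
-- VERB_TAGS = frozenset(['VB', 'VBD', 'VBG', 'VBN', 'VBP', 'VBZ'])
--
-- def removeBeBeforeVerbs(line):
--     # Pass 1: verbs drive removal — each verb-tagged token marks the
--     # index of a preceding 'be' token for deletion.
--     removal = set()
--     for j, tok in enumerate(line):
--         if j > 0 and tok[1] in VERB_TAGS and line[j - 1][0] == 'be':
--             removal.add(j - 1)
--     # Pass 2: rebuild the line, skipping the marked indices.
--     return [tok for i, tok in enumerate(line) if i not in removal]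
-- ===== Notes on version B (the rewrite author's own statement) =====
-- stated objective: alternative
-- what changed: A does one forward scan appending each token unless a lookahead shows it is 'be' followed by a verb; B inverts the driver into two passes: verb-tagged tokens mark the index of a preceding 'be' in a removal set, then the line is rebuilt skipping the marked indices.
import Mathlib
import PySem

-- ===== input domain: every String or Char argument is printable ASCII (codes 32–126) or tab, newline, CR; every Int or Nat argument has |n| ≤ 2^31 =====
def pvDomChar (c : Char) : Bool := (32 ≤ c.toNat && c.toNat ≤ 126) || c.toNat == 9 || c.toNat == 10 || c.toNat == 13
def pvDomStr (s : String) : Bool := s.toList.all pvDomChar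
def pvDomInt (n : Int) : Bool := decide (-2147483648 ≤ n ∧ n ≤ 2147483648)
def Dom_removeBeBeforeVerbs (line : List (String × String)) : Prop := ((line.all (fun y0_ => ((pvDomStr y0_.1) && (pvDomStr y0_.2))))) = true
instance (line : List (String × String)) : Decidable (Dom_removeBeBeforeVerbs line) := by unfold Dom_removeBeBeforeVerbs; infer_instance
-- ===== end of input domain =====

-- B re-implements the filter as two passes driven by the verbs (mark the index of a
-- preceding 'be', then rebuild skipping marked indices) instead of A's single
-- forward-lookahead scan; objective: alternative decomposition, same cost.

-- ===== PORT A =====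
def verbA (pos : String × String) : Bool :=
  if pos.2 == "VB" || pos.2 == "VBD" || pos.2 == "VBG" || pos.2 == "VBN" || pos.2 == "VBP" || pos.2 == "VBZ" then
    true
  else
    false

def removeBeBeforeVerbs (line : List (String × String)) : List (String × String) :=
  (PySem.List.pyRange 0 (PySem.List.len line) 1).foldl
    (fun removeBe index =>
      let current := PySem.List.pyGetD line index ("", "")
      if current.1 == "be" && !(index == PySem.List.len line - 1) then
        let next := PySem.List.pyGetD line (index + 1) ("", "")
        if verbA next == false then removeBe ++ [current] else removeBe
      else
        removeBe ++ [current])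
    []

-- ===== PORT B =====
def verbTags : List String := ["VB", "VBD", "VBG", "VBN", "VBP", "VBZ"]

-- pass 1 of Source B: verbs mark the index of a preceding 'be' for removal
def bRemoval (line : List (String × String)) : PySem.Set Int :=
  (PySem.List.enumerate line).foldl
    (fun s jt =>
      if jt.1 > 0 && verbTags.contains jt.2.2 && ((PySem.List.pyGetD line (jt.1 - 1) ("", "")).1 == "be") then
        PySem.Set.add s (jt.1 - 1)
      else s)
    PySem.Set.empty

def removeBeBeforeVerbs_alt (line : List (String × String)) : List (String × String) :=
  let removal := bRemoval line
  -- pass 2 of Source B: keep the tokens whose index is not marked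
  (PySem.List.enumerate line).foldl
    (fun out it => if !(PySem.Set.contains removal it.1) then out ++ [it.2] else out)
    []

-- ===== PRECONDITION & SPEC =====
def Spec_removeBeBeforeVerbs (line : List (String × String)) (out : List (String × String)) : Prop := out = removeBeBeforeVerbs_alt line
instance (line : List (String × String)) (out : List (String × String)) : Decidable (Spec_removeBeBeforeVerbs line out) := by unfold Spec_removeBeBeforeVerbs; infer_instance

-- ===== CLAIM (what is proved, stated in full; the proofs are below) =====
def Claim_equal_removeBeBeforeVerbs : Prop := ∀ (line : List (String × String)), Dom_removeBeBeforeVerbs line → Spec_removeBeBeforeVerbs line (removeBeBeforeVerbs line)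

-- ===== LEMMAS AND PROOFS =====

-- "index j is kept" exactly as A decides it (Int index)
def keepI (xs : List (String × String)) (j : Int) : Bool :=
  !((PySem.List.pyGetD xs j ("", "")).1 == "be" && !(j == PySem.List.len xs - 1)
      && verbA (PySem.List.pyGetD xs (j + 1) ("", "")))

theorem A_canon (xs : List (String × String)) :
    removeBeBeforeVerbs xs
      = ((PySem.List.pyRange 0 (PySem.List.len xs) 1).filter (keepI xs)).map
          (fun j => PySem.List.pyGetD xs j ("", "")) := by
  unfold removeBeBeforeVerbs
  have hfun : (fun (removeBe : List (String × String)) (index : Int) =>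
      let current := PySem.List.pyGetD xs index ("", "")
      if current.1 == "be" && !(index == PySem.List.len xs - 1) then
        let next := PySem.List.pyGetD xs (index + 1) ("", "")
        if verbA next == false then removeBe ++ [current] else removeBe
      else
        removeBe ++ [current])
      = (fun removeBe j =>
          if keepI xs j then removeBe ++ [PySem.List.pyGetD xs j ("", "")] else removeBe) := by
    funext acc j
    simp only [keepI]
    by_cases h1 : ((PySem.List.pyGetD xs j ("", "")).1 == "be") = true <;>
      by_cases h2 : (j == PySem.List.len xs - 1) = true <;>
        by_cases h3 : verbA (PySem.List.pyGetD xs (j + 1) ("", "")) = true <;>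
          simp [h1, h3]
  rw [hfun, PySem.List.foldl_append_if, List.nil_append]

theorem B_canon (xs : List (String × String)) :
    removeBeBeforeVerbs_alt xs
      = ((PySem.List.pyRange 0 (PySem.List.len xs) 1).filter
          (fun j => !(PySem.Set.contains (bRemoval xs) j))).map
          (fun j => PySem.List.pyGetD xs j ("", "")) := by
  unfold removeBeBeforeVerbs_alt
  rw [PySem.List.enumerate_eq_map_pyRange xs ("", ""), List.foldl_map,
    PySem.List.foldl_append_if, List.nil_append]

theorem mem_foldl_add {α β : Type} [BEq α] [LawfulBEq α] (p : β → Bool) (g : β → α)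
    (l : List β) (s0 : PySem.Set α) (x : α) :
    x ∈ l.foldl (fun s b => if p b then PySem.Set.add s (g b) else s) s0
      ↔ x ∈ s0 ∨ ∃ b ∈ l, p b ∧ x = g b := by
  induction l generalizing s0 with
  | nil => simp
  | cons b l ih =>
    simp only [List.foldl_cons, ih, List.mem_cons]
    by_cases hp : p b = true
    · simp [hp, PySem.Set.mem_add]
      try tauto
    · simp only [Bool.not_eq_true] at hp
      simp [hp]
      try tauto

theorem verb_eq (t : String × String) : verbTags.contains t.2 = verbA t := by
  refine Bool.eq_iff_iff.mpr ?_
  simp [verbTags, verbA, beq_iff_eq]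
  tauto

theorem pyGetD_lt (xs : List (String × String)) (k : Nat) (hk : k < xs.length) :
    PySem.List.pyGetD xs (k : Int) ("", "") = xs[k] := by
  rw [PySem.List.pyGetD_natCast, List.getD_eq_getElem _ _ hk]

theorem mem_bRemoval (xs : List (String × String)) (j : Int)
    (h0 : 0 ≤ j) (hn : j < (xs.length : Int)) :
    (j ∈ bRemoval xs) ↔ keepI xs j = false := by
  unfold bRemoval
  rw [mem_foldl_add]
  simp only [PySem.Set.empty, List.not_mem_nil, false_or]
  constructor
  · rintro ⟨jt, hmem, hcond, hx⟩
    rw [PySem.List.mem_enumerate_iff] at hmem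
    obtain ⟨k, hk, rfl⟩ := hmem
    simp only [zero_add] at hcond hx
    simp only [Bool.and_eq_true, decide_eq_true_eq] at hcond
    obtain ⟨⟨hkpos, hverb⟩, hbe⟩ := hcond
    subst hx
    have hk1 : 1 ≤ k := by exact_mod_cast hkpos
    simp only [keepI, Bool.not_eq_false', Bool.and_eq_true]
    refine ⟨⟨hbe, ?_⟩, ?_⟩
    · simp only [Bool.not_eq_true', beq_eq_false_iff_ne, ne_eq, PySem.List.len_eq]
      intro hcontra
      have : k = xs.length := by omega
      omega
    · have e1 : ((k : Int) - 1 + 1) = (k : Int) := by ring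
      rw [e1, pyGetD_lt xs k hk, ← verb_eq]
      exact hverb
  · intro hkeep
    simp only [keepI, Bool.not_eq_false', Bool.and_eq_true] at hkeep
    obtain ⟨⟨hbe, hne⟩, hverb⟩ := hkeep
    have hne' : j ≠ (xs.length : Int) - 1 := by
      simp only [Bool.not_eq_true', beq_eq_false_iff_ne, ne_eq, PySem.List.len_eq] at hne
      exact hne
    have hjn : j + 1 < (xs.length : Int) := by omega
    have hklt : (j + 1).toNat < xs.length := by omega
    refine ⟨((j + 1 : Int), xs[(j + 1).toNat]'hklt), ?_, ?_, by ring⟩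
    · rw [PySem.List.mem_enumerate_iff]
      refine ⟨(j + 1).toNat, hklt, ?_⟩
      have : ((0 : Int) + ((j + 1).toNat : Int)) = j + 1 := by omega
      rw [this]
    · have e1 : (j + 1 - 1) = j := by ring
      simp only [Bool.and_eq_true, decide_eq_true_eq]
      refine ⟨⟨by omega, ?_⟩, by rw [e1]; exact hbe⟩
      rw [verb_eq]
      have hj1 : (j + 1 : Int) = (((j + 1).toNat : Nat) : Int) := by omega
      rw [hj1, pyGetD_lt xs _ hklt] at hverb
      exact hverb

-- ===== VERDICT (by name: the statement is the Claim_ definition above) =====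
theorem removeBeBeforeVerbs_spec : Claim_equal_removeBeBeforeVerbs := by
  intro xs _
  unfold Spec_removeBeBeforeVerbs
  rw [A_canon, B_canon]
  congr 1
  apply List.filter_congr
  intro j hj
  rw [PySem.List.mem_pyRange_one] at hj
  have h := mem_bRemoval xs j hj.1 (by exact_mod_cast hj.2)
  cases hk : keepI xs j
  · have hmem : j ∈ bRemoval xs := h.mpr hk
    have hc : PySem.Set.contains (bRemoval xs) j = true :=
      (PySem.Set.contains_iff _ _).mpr hmem
    rw [hc]
    rfl
  · have hc : PySem.Set.contains (bRemoval xs) j = false := by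
      rw [Bool.eq_false_iff]
      intro hcontra
      have := h.mp ((PySem.Set.contains_iff _ _).mp hcontra)
      simp [hk] at this
    rw [hc]
    rfl
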